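import PySemCore
-- every primitive family reduces in the KERNEL on a small literal (decide / rfl), and a trivial lemma about it is provable by
-- ordinary tactics — no native_decide anywhere
example : PySem.Int.floordiv (-7) 2 = -4 := by decide
example : PySem.Int.mod (-7) 2 = 1 := by decide
example : PySem.Int.divmod? 7 (-2) = some (-4, -1) := by decide
example : PySem.Int.toChars (-120) = ['-', '1', '2', '0'] := by decide
example : PySem.Int.ofChars? [' ', '-', '4', '_', '2'] = some (-42) := by decide
example : PySem.List.pyGet? [10, 20, 30] (-1) = some 30 := by decide
example : PySem.List.pySet? [1, 2, 3] (-3) 9 = some [9, 2, 3] := by decide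
example : PySem.List.slice [1, 2, 3, 4, 5] (some 1) (some (-1)) = [2, 3, 4] := by decide
example : PySem.List.slice? [1, 2, 3, 4, 5] none none (-2) = some [5, 3, 1] := by decide
example : PySem.List.pyRange 5 0 (-2) = [5, 3, 1] := by decide
example : PySem.List.sorted [3, 1, 2] (fun x => x % 2) = [2, 3, 1] := by decide
example : PySem.List.sorted2 [(1, 5), (0, 9), (1, 2)] (fun p => p.1) (fun p => p.2) = [(0, 9), (1, 2), (1, 5)] := by decide
example : PySem.Str.len "abc" = 3 := by decide
example : PySem.Str.lower "AbC" = "abc" := by decide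
example : PySem.Int.toStr (-12) = "-12" := by decide
example : PySem.List.min? [3, 1, 4, 1] (fun x => x) = some 1 := by decide
example : PySem.List.pop? [1, 2, 3] = some (3, [1, 2]) := by decide
example : (PySem.Dict.ofList [(1, 10), (2, 20), (1, 11)]).items = [(1, 11), (2, 20)] := by decide
example : ((PySem.Dict.ofList [("a", 1)]).insert "b" 2).get? "b" = some 2 := by decide
example (d : PySem.Dict String Int) (v : Int) : (d.insert "k" v).getD "k" 0 = v := by simp
example (d : PySem.Dict Nat Int) : (d.modify 3 0 (· + 1)).getD 3 0 = d.getD 3 0 + 1 := by simp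
example : PySem.Chars.split₀ [' ', 'a', ' ', ' ', 'b'] = [['a'], ['b']] := by decide
example : PySem.Chars.splitOn ['a', ',', ',', 'b'] [','] = [['a'], [], ['b']] := by decide
example : PySem.Chars.strip [' ', 'x', '\n'] = ['x'] := by decide
example : PySem.Chars.lower ['A', 'b', 'C'] = ['a', 'b', 'c'] := by decide
example : PySem.Chars.find ['a', 'b', 'c'] ['b', 'c'] = 1 := by decide
example : PySem.Chars.count ['a', 'a', 'a'] ['a', 'a'] = 1 := by decide
example : PySem.Chars.replace ['a', 'b', 'a'] ['a'] ['x', 'y'] = ['x', 'y', 'b', 'x', 'y'] := by decide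
example : PySem.Chars.splitlines ['a', '\r', '\n', 'b', '\n'] = [['a'], ['b']] := by decide
example : PySem.Chars.isspace '\x1c' = true := by decide
example : PySem.Chars.strIsdigit ['1', '2'] = true := by decide
-- the String wrappers unfold to the Chars definitions (rfl / simp with the bridge lemma), so a String-level goal moves to lists
example (s : String) : (PySem.Str.lower s).toList = PySem.Chars.lower s.toList := by simp
example (s : String) : PySem.Str.find s "" = PySem.Chars.find s.toList [] := by simp [PySem.Str.find_eq]
-- trivial lemmas, ordinary tactics
example (xs : List Int) : PySem.List.slice xs none none = xs := by simp
example (a : Int) : PySem.List.pyRange a a 1 = [] := by simp [PySem.List.pyRange_one]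
example (n : Int) : (PySem.List.pyRange 0 n 1).length = n.toNat := by simp
example (xs : List Int) (h : 2 ≤ xs.length) : PySem.List.slice xs (some 0) (some 2) = xs.take 2 := by
  rw [PySem.List.slice_of_nonneg xs (by omega) (by omega) (by omega) (by exact_mod_cast h)]; simp
example (c : Char) : PySem.Chars.isupper (PySem.Chars.lowerChar 'Q') = false := by decide

-- lemma pack 2 in use (ordinary tactics)
example (a : Int) (h : a < a + 3) : PySem.List.pyRange a (a + 3) 1 = a :: PySem.List.pyRange (a + 1) (a + 3) 1 := PySem.List.pyRange_one_cons h
example (d : PySem.Dict String Nat) (h : d.keys.Nodup) : (d.insert "x" 1).keys.Nodup := PySem.Dict.nodup_keys_insert d "x" 1 h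
example (xs : List Int) (h : PySem.List.min? xs (fun x => x) = some 5) : 5 ∈ xs := PySem.List.min?_mem h
example : PySem.Chars.join [] ([['a'], ['b']]) = ['a', 'b'] := by decide

-- lemma pack 3: the new definitions (Set, dedup, enumerate, pySetD, counter) reduce in the kernel, and the loop-shape / range /
-- slice / dict lemmas close the goals a port's proof meets, by name
example : PySem.Set.ofList [3, 1, 3, 2, 1] = [3, 1, 2] := by decide
example : PySem.Set.add [1, 2] 2 = [1, 2] := by decide
example : PySem.Set.add [1, 2] 5 = [1, 2, 5] := by decide
example : PySem.Set.union [1, 2] [2, 3] = [1, 2, 3] := by decide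
example : PySem.Set.diff [1, 2, 3] [2] = [1, 3] := by decide
example : PySem.Set.inter [1, 2, 3] [3, 2] = [2, 3] := by decide
example : PySem.Set.contains (PySem.Set.ofList ['a', 'b']) 'b' = true := by decide
example : PySem.Set.remove? ["p"] "q" = none := by decide
example : PySem.List.dedup ["x", "y", "x"] = ["x", "y"] := by decide
example : PySem.List.enumerate ["a", "b"] 1 = [(1, "a"), (2, "b")] := by decide
example : PySem.List.enumerate [7, 8] = [(0, 7), (1, 8)] := by decide
example : PySem.List.pySetD [1, 2, 3] (-1) 9 = [1, 2, 9] := by decide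
example : PySem.List.pySetD [1, 2, 3] 3 9 = [1, 2, 3] := by decide
example : (PySem.Dict.counter [1, 2, 1]).items = [(1, 2), (2, 1)] := by decide
example : (PySem.Dict.counter ["b", "a", "b"]).getD "b" 0 = 2 := by decide
example (l : List Int) : l.foldl (fun acc x => acc ++ [x + 1]) [] = [] ++ l.map (fun x => x + 1) := PySem.List.foldl_append_singleton_eq_map _ l []
example (l acc : List Int) : l.foldl (fun a x => if x > 0 then a ++ [x] else a) acc = acc ++ l.filter (fun x => decide (x > 0)) :=
  PySem.List.foldl_append_ite_eq_filter _ l acc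
example (l : List (List Nat)) : l.foldl (fun a x => a ++ x) [] = [] ++ l.flatten := PySem.List.foldl_append_eq_flatten l []
example (l : List Int) (n : Int) : l.foldl (fun c x => if x == 3 then c + 1 else c) n = n + (l.count 3 : Int) := PySem.List.foldl_beq_add_one l 3 n
example (a : Int) : PySem.List.pyRange a (a + 5) 1 = PySem.List.pyRange a (a + 2) 1 ++ PySem.List.pyRange (a + 2) (a + 5) 1 :=
  PySem.List.pyRange_one_append a (a + 2) (a + 5) (by omega) (by omega)
example (a : Int) (h : 0 < a) : PySem.List.pyRange a 0 (-1) = a :: PySem.List.pyRange (a - 1) 0 (-1) := PySem.List.pyRange_neg_one_cons h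
example (xs : List Int) : PySem.List.slice xs (some ((2 : Nat) : Int)) (some ((5 : Nat) : Int)) = (xs.drop 2).take (5 - 2) := PySem.List.slice_natCast xs 2 5
example (xs : List Int) (n : Nat) : PySem.List.pyGet? xs n = xs[n]? := by simp
example (xs : List String) (f : Nat → String → Nat) : (PySem.List.pyRange 0 (PySem.List.len xs) 1).foldl (fun acc j => f acc (PySem.List.pyGetD xs j "")) 0 = xs.foldl f 0 :=
  PySem.List.foldl_pyRange_zero_pyGetD xs "" f 0
example (xs : List Int) : (PySem.List.enumerate xs 0).map (·.2) = xs := by simp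
example (d : PySem.Dict String Int) : (d.insert "a" 1).getD "b" 0 = d.getD "b" 0 := by rw [PySem.Dict.getD_insert]; simp
example (l : List String) : (PySem.Dict.counter l).getD "k" 0 = (l.count "k" : Int) := PySem.Dict.getD_counter l "k"
example (l : List Int) (d : PySem.Dict Int Int) : (l.foldl (fun d x => d.insert x (d.getD x 0 + 1)) d).getD 4 0 = d.getD 4 0 + (l.count 4 : Int) :=
  PySem.Dict.getD_foldl_insert_add_one l d 4
example (xs : List Int) (x : Int) : x ∈ PySem.Set.ofList xs ↔ x ∈ xs := PySem.Set.mem_ofList xs x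
example : PySem.Int.floordiv (7 : Nat) (2 : Nat) = ((7 / 2 : Nat) : Int) := PySem.Int.floordiv_natCast 7 2
example : PySem.Set.symmDiff [1, 2, 3] [2, 9] = [1, 3, 9] := by decide
example : PySem.Set.equal [1, 2] [2, 1] = true := by decide
example : PySem.Set.ofList [2, 1, 2, 3] = 2 :: PySem.Set.discard (PySem.Set.ofList [1, 2, 3]) 2 := PySem.Set.ofList_cons 2 [1, 2, 3]
-- pack 3b (ps34): binary formatting and zfill reduce in the kernel
example : PySem.Int.toBinChars 10 = ['1', '0', '1', '0'] := by decide
example : PySem.Int.toBinChars (-5) = ['-', '1', '0', '1'] := by decide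
example : PySem.Int.toBinChars0b 0 = ['0', 'b', '0'] := by decide
example : PySem.Chars.zfill ['-', '7'] 4 = ['-', '0', '0', '7'] := by decide
example : PySem.Chars.zfill ['a', 'b'] 1 = ['a', 'b'] := by decide
-- pack 6: pow with a modulus, max/min with default, itertools.permutations, bisect reduce in the kernel; the pack-6 bridge lemmas close by name
example : PySem.Int.powMod 3 4 (-7) = -3 ∧ PySem.Int.powMod 2 10 1000 = 24 := by decide
example : PySem.List.maxD [3, 9, 2] (fun x => x) 0 = 9 ∧ PySem.List.minD ([] : List Int) (fun x => x) 5 = 5 := by decide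
example : PySem.List.permutations [1, 2, 3] 2 = [[1, 2], [1, 3], [2, 1], [2, 3], [3, 1], [3, 2]] := by decide
example : PySem.List.bisectLeft [1, 2, 2, 4] 2 = 1 ∧ PySem.List.bisectRight [1, 2, 2, 4] 2 = 3 := by decide
example : PySem.List.pyRange 1 10 3 = [1, 4, 7] ∧ ((5 : Int) ∈ PySem.List.pyRange 1 10 2) := by decide
example (xs : List Int) (f : Int → Int) (i : Int) : PySem.List.pyGetD (xs.map f) i (f 0) = f (PySem.List.pyGetD xs i 0) := PySem.List.pyGetD_map f xs i 0
example (xs : List Int) (i : Int) (h : 0 ≤ i) : PySem.List.pyGetD xs i 0 = xs.getD i.toNat 0 := PySem.List.pyGetD_of_nonneg xs 0 h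
example (p : Int → Bool) (xs : List Int) : (xs.map (fun x => if p x then (1 : Int) else 0)).sum = xs.countP p := PySem.List.sum_map_ite_one_zero p xs
example (a b : Int) : PySem.Int.floordiv (-a) (-b) = PySem.Int.floordiv a b ∧ PySem.Int.mod (-a) (-b) = -PySem.Int.mod a b := ⟨by simp, by simp⟩
example (x : Int) (h : x ∈ PySem.List.pyRange 1 100 3) : x < 100 := ((PySem.List.mem_pyRange_iff_of_pos (by decide) x).mp h).2.1
example (p : List Int) (h : p ∈ PySem.List.permutations [1, 2, 3] 3) : p.Perm [1, 2, 3] := PySem.List.perm_of_mem_permutations h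
-- (the `pysem` simp SET is registered here in PySemCore but its members are tagged in PySem.lean, which needs Mathlib: its usage
-- examples live in pv_pysem_simpset.lean, compiled in the production image by the in-image prelude test, not by this core-only file)
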